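-- pv_equiv track=rewrite | github.com/muhammadhasyim/tps-diffusion-model | src/python/genai_tps/simulation/repex_distributed.py | assign_replica_groups
-- ===== SOURCE A (Python) =====
-- from typing import Any, Sequence
--
-- def assign_replica_groups(replica_devices: Sequence[int]) -> tuple[list[int], dict[int, int], dict[int, list[int]]]:
--     """Return unique devices, ``replica -> rank``, and ``rank -> replicas`` mapping."""
--     devices = sorted({int(dev) for dev in replica_devices})
--     rank_for_device = {dev: rank for rank, dev in enumerate(devices)}
--     replica_to_rank: dict[int, int] = {}
--     rank_to_replicas: dict[int, list[int]] = {rank: [] for rank in range(len(devices))}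
--     for replica, dev in enumerate(replica_devices):
--         rank = rank_for_device[int(dev)]
--         replica_to_rank[int(replica)] = int(rank)
--         rank_to_replicas[int(rank)].append(int(replica))
--     return devices, replica_to_rank, rank_to_replicas
-- ===== SOURCE B (Python) =====
-- from typing import Any, Sequence
--
-- def assign_replica_groups(replica_devices: Sequence[int]) -> tuple[list[int], dict[int, int], dict[int, list[int]]]:
--     """Return unique devices, ``replica -> rank``, and ``rank -> replicas`` mapping."""
--     distinct = {int(dev) for dev in replica_devices}
--     devices = sorted(distinct)
--     replica_to_rank = {
--         replica: sum(1 for x in distinct if x < int(dev))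
--         for replica, dev in enumerate(replica_devices)
--     }
--     rank_to_replicas = {
--         rank: [replica for replica, d in enumerate(replica_devices) if int(d) == dev]
--         for rank, dev in enumerate(devices)
--     }
--     return devices, replica_to_rank, rank_to_replicas
-- ===== Notes on version B (the rewrite author's own statement) =====
-- stated objective: alternative
-- what changed: B drops both auxiliary dicts and the single mutating loop: it computes each replica's rank directly by counting distinct devices smaller than its device, and builds rank->replicas by filtering the enumerated input per device, all as comprehensions; it trades A's dict lookups for per-device scans (O(n*k), k = number of distinct devices, which is small in the replica/GPU setting).
import Mathlib
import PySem

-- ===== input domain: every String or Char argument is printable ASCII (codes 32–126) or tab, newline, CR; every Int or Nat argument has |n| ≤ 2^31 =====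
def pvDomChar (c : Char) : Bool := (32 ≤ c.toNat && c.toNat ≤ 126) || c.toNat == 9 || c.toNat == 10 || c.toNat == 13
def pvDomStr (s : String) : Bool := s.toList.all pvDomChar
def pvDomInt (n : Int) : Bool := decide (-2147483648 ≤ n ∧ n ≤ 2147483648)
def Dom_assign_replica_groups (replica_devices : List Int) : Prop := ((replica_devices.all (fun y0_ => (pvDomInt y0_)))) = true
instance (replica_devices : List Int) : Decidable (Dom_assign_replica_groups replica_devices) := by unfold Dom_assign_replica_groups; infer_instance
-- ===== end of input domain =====

-- B replaces A's two auxiliary dicts and single mutating loop by direct comprehensions: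
-- each replica's rank is the count of distinct devices smaller than its own device, and
-- rank -> replicas is a per-device filter of the enumerated input (objective: alternative).

-- ===== PORT A =====
-- literal port of A; the lookup rank_for_device[int(dev)] always finds its key
-- (every device of the input is in the sorted device set), so getD 0 is exact here.
def assign_replica_groups (replica_devices : List Int) : List Int × (List (Int × Int)) × (List (Int × List Int)) :=
  let devices := PySem.List.sorted (PySem.Set.ofList replica_devices) (fun x => x)
  let rank_for_device : PySem.Dict Int Int :=
    (PySem.List.enumerate devices).foldl (fun d p => d.insert p.2 p.1) PySem.Dict.empty
  let rank_to_replicas0 : PySem.Dict Int (List Int) :=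
    (PySem.List.pyRange 0 (devices.length : Int)).foldl (fun d r => d.insert r []) PySem.Dict.empty
  let st :=
    (PySem.List.enumerate replica_devices).foldl
      (fun (st : PySem.Dict Int Int × PySem.Dict Int (List Int)) p =>
        (st.1.insert p.1 (rank_for_device.getD p.2 0),
         st.2.modify (rank_for_device.getD p.2 0) [] (fun l => l ++ [p.1])))
      (PySem.Dict.empty, rank_to_replicas0)
  (devices, st.1.items, st.2.items)

-- ===== PORT B =====
-- sum(1 for x in distinct if x < d)
def rankCount (distinct : List Int) (d : Int) : Int :=
  distinct.foldl (fun acc x => if x < d then acc + 1 else acc) 0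

def assign_replica_groups_alt (replica_devices : List Int) : List Int × (List (Int × Int)) × (List (Int × List Int)) :=
  let distinct := PySem.Set.ofList replica_devices
  let devices := PySem.List.sorted distinct (fun x => x)
  let replica_to_rank : PySem.Dict Int Int :=
    (PySem.List.enumerate replica_devices).foldl
      (fun d p => d.insert p.1 (rankCount distinct p.2)) PySem.Dict.empty
  let rank_to_replicas : PySem.Dict Int (List Int) :=
    (PySem.List.enumerate devices).foldl
      (fun d p => d.insert p.1
        (((PySem.List.enumerate replica_devices).filter (fun q => q.2 == p.2)).map (fun q => q.1)))
      PySem.Dict.empty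
  (devices, replica_to_rank.items, rank_to_replicas.items)

-- ===== PRECONDITION & SPEC =====
def Spec_assign_replica_groups (replica_devices : List Int) (out : List Int × (List (Int × Int)) × (List (Int × List Int))) : Prop := out = assign_replica_groups_alt replica_devices
instance (replica_devices : List Int) (out : List Int × (List (Int × Int)) × (List (Int × List Int))) : Decidable (Spec_assign_replica_groups replica_devices out) := by unfold Spec_assign_replica_groups; infer_instance

-- ===== CLAIM (what is proved, stated in full; the proofs are below) =====
def Claim_equal_assign_replica_groups : Prop := ∀ (replica_devices : List Int), Dom_assign_replica_groups replica_devices → Spec_assign_replica_groups replica_devices (assign_replica_groups replica_devices)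

-- ===== LEMMAS AND PROOFS =====

-- the sorted distinct device list, and the rank of a device in it
def dsOf (rd : List Int) : List Int := PySem.List.sorted (PySem.Set.ofList rd) (fun x => x)
def cnt (rd : List Int) (d : Int) : Int := (List.countP (fun x => decide (x < d)) (dsOf rd) : Int)

theorem enum_map_fst {α : Type} (xs : List α) (s : Int) :
    (PySem.List.enumerate xs s).map (fun p => p.1) = PySem.List.pyRange s (s + xs.length) := by
  induction xs generalizing s with
  | nil => simp [PySem.List.enumerate, PySem.List.pyRange]
  | cons a t ih =>
    have hlt : s < s + ((a :: t).length : Int) := by simp only [List.length_cons]; push_cast; omega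
    rw [PySem.List.pyRange_one_cons hlt]
    have h2 : s + ((a :: t).length : Int) = (s + 1) + (t.length : Int) := by simp only [List.length_cons]; push_cast; ring
    rw [h2]
    simp [PySem.List.enumerate, ih]

theorem enum_map_snd {α : Type} (xs : List α) (s : Int) :
    (PySem.List.enumerate xs s).map (fun p => p.2) = xs := by
  induction xs generalizing s with
  | nil => simp [PySem.List.enumerate]
  | cons a t ih => simp [PySem.List.enumerate, ih]

theorem enum_mem_snd {α : Type} {xs : List α} {s : Int} {p : Int × α}
    (h : p ∈ PySem.List.enumerate xs s) : p.2 ∈ xs := by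
  induction xs generalizing s with
  | nil => simp [PySem.List.enumerate] at h
  | cons a t ih =>
    simp [PySem.List.enumerate] at h
    rcases h with h | h
    · subst h; simp
    · exact List.mem_cons_of_mem _ (ih h)

theorem enum_mem_fst_le {α : Type} {xs : List α} {s : Int} {p : Int × α}
    (h : p ∈ PySem.List.enumerate xs s) : s ≤ p.1 := by
  induction xs generalizing s with
  | nil => simp [PySem.List.enumerate] at h
  | cons a t ih =>
    simp [PySem.List.enumerate] at h
    rcases h with h | h
    · subst h; simp
    · have := ih h; omega

theorem nodup_pyRange (a b : Int) : (PySem.List.pyRange a b).Nodup := by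
  unfold PySem.List.pyRange
  split
  · exact List.nodup_nil
  · refine List.Nodup.map ?_ List.nodup_range
    intro x y h
    simp at h
    omega

theorem set_update_self (l : List Int) (s : PySem.Set Int) (h : ∀ x ∈ l, x ∈ s) :
    PySem.Set.update s l = s := by
  induction l generalizing s with
  | nil => rfl
  | cons a t ih =>
    have ha : a ∈ s := h a (by simp)
    have hc : s.contains a = true := by simpa using ha
    have hadd : PySem.Set.add s a = s := by simp [PySem.Set.add, ha]
    calc PySem.Set.update s (a :: t) = PySem.Set.update (PySem.Set.add s a) t := rfl
      _ = PySem.Set.update s t := by rw [hadd]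
      _ = s := ih s (fun x hx => h x (by simp [hx]))

theorem lookup_map_nil (l : List Int) (c : Int) :
    (PySem.Dict.mk (l.map (fun r => (r, ([] : List Int))))).getD c [] = [] := by
  induction l with
  | nil => rfl
  | cons a t ih =>
    by_cases h : a = c
    · simp [PySem.Dict.getD, PySem.Dict.get?, h]
    · simpa [PySem.Dict.getD, PySem.Dict.get?, List.find?, h] using ih

theorem getD_enum_swap (ds : List Int) (s : Int) (pw : List.Pairwise (· < ·) ds)
    (d : Int) (hd : d ∈ ds) :
    (PySem.Dict.mk ((PySem.List.enumerate ds s).map (fun p => (p.2, p.1)))).getD d 0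
      = s + (List.countP (fun x => decide (x < d)) ds : Int) := by
  induction ds generalizing s with
  | nil => simp at hd
  | cons a t ih =>
    rcases List.mem_cons.mp hd with h | h
    · subst h
      have hz : List.countP (fun x => decide (x < d)) (d :: t) = 0 := by
        rw [List.countP_eq_zero]
        intro x hx
        rcases List.mem_cons.mp hx with rfl | hx
        · simp
        · have := (List.pairwise_cons.mp pw).1 x hx
          simp; omega
      simp [PySem.List.enumerate, PySem.Dict.getD, PySem.Dict.get?, hz]
    · have hlt : a < d := (List.pairwise_cons.mp pw).1 d h
      have hne : (a == d) = false := by simp; omega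
      have hc : List.countP (fun x => decide (x < d)) (a :: t)
          = List.countP (fun x => decide (x < d)) t + 1 := by
        rw [List.countP_cons_of_pos]
        simp; omega
      have := ih (s + 1) (List.pairwise_cons.mp pw).2 h
      simp only [PySem.List.enumerate, List.map_cons, PySem.Dict.getD, PySem.Dict.get?,
        List.find?, hne] at this ⊢
      rw [this, hc]
      push_cast; ring

theorem enum_rank_iff (ds : List Int) (s : Int) (pw : List.Pairwise (· < ·) ds)
    (d : Int) (hd : d ∈ ds) (p : Int × Int) (hp : p ∈ PySem.List.enumerate ds s) :
    ((List.countP (fun x => decide (x < d)) ds : Int) + s = p.1 ↔ d = p.2) := by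
  induction ds generalizing s with
  | nil => simp at hd
  | cons a t ih =>
    simp only [PySem.List.enumerate, List.mem_cons] at hp
    rcases List.mem_cons.mp hd with h | h
    · subst h
      have hz : List.countP (fun x => decide (x < d)) (d :: t) = 0 := by
        rw [List.countP_eq_zero]
        intro x hx
        rcases List.mem_cons.mp hx with rfl | hx
        · simp
        · have := (List.pairwise_cons.mp pw).1 x hx
          simp; omega
      rcases hp with rfl | hp
      · simp [hz]
      · have h1 : s + 1 ≤ p.1 := enum_mem_fst_le hp
        have h2 : p.2 ∈ t := enum_mem_snd hp
        have h3 : d < p.2 := (List.pairwise_cons.mp pw).1 p.2 h2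
        constructor
        · intro hx; rw [hz] at hx; omega
        · intro hx; omega
    · have hlt : a < d := (List.pairwise_cons.mp pw).1 d h
      have hc : List.countP (fun x => decide (x < d)) (a :: t)
          = List.countP (fun x => decide (x < d)) t + 1 := by
        rw [List.countP_cons_of_pos]
        simp; omega
      rcases hp with rfl | hp
      · simp only [hc]
        constructor
        · intro hx; push_cast at hx; omega
        · intro hx; omega
      · have := ih (s + 1) (List.pairwise_cons.mp pw).2 h hp
        rw [hc]
        constructor
        · intro hx
          apply this.mp
          push_cast at hx ⊢; omega
        · intro hx
          have := this.mpr hx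
          push_cast at this ⊢; omega

theorem pairwise_dsOf (rd : List Int) : List.Pairwise (· < ·) (dsOf rd) := by
  have hle : List.Pairwise (fun a b : Int => a ≤ b) (dsOf rd) := by
    simpa using PySem.List.sorted_pairwise (PySem.Set.ofList rd) (fun x : Int => x)
  have hnd : (dsOf rd).Nodup :=
    ((PySem.List.sorted_perm (PySem.Set.ofList rd) (fun x : Int => x) false).nodup_iff).mpr
      (PySem.Set.nodup_ofList rd)
  have := hle.and hnd
  exact this.imp (fun h => lt_of_le_of_ne h.1 h.2)

theorem mem_dsOf {rd : List Int} {d : Int} (h : d ∈ rd) : d ∈ dsOf rd := by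
  have : d ∈ PySem.Set.ofList rd := (PySem.Set.mem_ofList rd d).mpr h
  exact ((PySem.List.sorted_perm (PySem.Set.ofList rd) (fun x : Int => x) false).mem_iff).mpr this

theorem cnt_lt_len {rd : List Int} {d : Int} (h : d ∈ dsOf rd) :
    List.countP (fun x => decide (x < d)) (dsOf rd) < (dsOf rd).length := by
  refine lt_of_le_of_ne List.countP_le_length ?_
  intro he
  have := (List.countP_eq_length.mp he) d h
  simp at this

theorem cnt_perm (rd : List Int) (d : Int) :
    rankCount (PySem.Set.ofList rd) d = cnt rd d := by
  unfold rankCount cnt dsOf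
  rw [show (fun (acc x : Int) => if x < d then acc + 1 else acc)
      = (fun (acc x : Int) => if (fun x : Int => decide (x < d)) x = true then acc + 1 else acc)
    from funext fun acc => funext fun x => by simp]
  rw [PySem.List.foldl_count_if (fun x : Int => decide (x < d))]
  have hp := (PySem.List.sorted_perm (PySem.Set.ofList rd) (fun x : Int => x) false).countP_eq
    (fun x => decide (x < d))
  rw [hp]
  ring

theorem rfd_getD (rd : List Int) (d : Int) (hd : d ∈ rd) :
    ((PySem.List.enumerate (dsOf rd)).foldl (fun acc p => acc.insert p.2 p.1)
        PySem.Dict.empty).getD d 0 = cnt rd d := by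
  have hitems := PySem.Dict.items_foldl_insert_fresh (PySem.List.enumerate (dsOf rd))
      (fun p => p.2) (fun p => p.1) PySem.Dict.empty
      (by intro a _; rfl)
      (by rw [enum_map_snd]
          exact ((PySem.List.sorted_perm (PySem.Set.ofList rd) (fun x : Int => x)
            false).nodup_iff).mpr (PySem.Set.nodup_ofList rd))
  have heq : (PySem.List.enumerate (dsOf rd)).foldl (fun acc p => acc.insert p.2 p.1)
      PySem.Dict.empty
      = PySem.Dict.mk ((PySem.List.enumerate (dsOf rd)).map (fun p => (p.2, p.1))) := by
    apply PySem.Dict.ext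
    simpa using hitems
  rw [heq]
  have := getD_enum_swap (dsOf rd) 0 (pairwise_dsOf rd) d (mem_dsOf hd)
  rw [this]
  unfold cnt; ring

theorem r2r_items_eq (rd : List Int) :
    ((PySem.List.enumerate rd).foldl
        (fun acc (p : Int × Int) =>
          acc.insert p.1
            (((PySem.List.enumerate (dsOf rd)).foldl (fun d q => d.insert q.2 q.1)
              PySem.Dict.empty).getD p.2 0))
        PySem.Dict.empty).items
      = ((PySem.List.enumerate rd).foldl
          (fun acc (p : Int × Int) => acc.insert p.1 (rankCount (PySem.Set.ofList rd) p.2))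
          PySem.Dict.empty).items := by
  have hnd : ((PySem.List.enumerate rd).map (fun p => p.1)).Nodup := by
    rw [enum_map_fst]; exact nodup_pyRange _ _
  rw [PySem.Dict.items_foldl_insert_fresh (PySem.List.enumerate rd) (fun p => p.1) _
      PySem.Dict.empty (by intro a _; rfl) hnd,
    PySem.Dict.items_foldl_insert_fresh (PySem.List.enumerate rd) (fun p => p.1) _
      PySem.Dict.empty (by intro a _; rfl) hnd]
  refine congrArg _ (List.map_congr_left ?_)
  intro p hp
  rw [rfd_getD rd p.2 (enum_mem_snd hp), cnt_perm]

theorem rk2r_items_eq (rd : List Int) :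
    ((PySem.List.enumerate rd).foldl
        (fun acc (p : Int × Int) =>
          acc.modify
            (((PySem.List.enumerate (dsOf rd)).foldl (fun d q => d.insert q.2 q.1)
              PySem.Dict.empty).getD p.2 0) [] (fun l => l ++ [p.1]))
        ((PySem.List.pyRange 0 ((dsOf rd).length : Int)).foldl (fun d r => d.insert r [])
          PySem.Dict.empty)).items
      = ((PySem.List.enumerate (dsOf rd)).foldl
          (fun d (p : Int × Int) => d.insert p.1
            (((PySem.List.enumerate rd).filter (fun q => q.2 == p.2)).map (fun q => q.1)))
          PySem.Dict.empty).items := by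
  set ds := dsOf rd with hds
  set k : Int := (ds.length : Int) with hk
  set init : PySem.Dict Int (List Int) :=
    (PySem.List.pyRange 0 k).foldl (fun d r => d.insert r []) PySem.Dict.empty with hinit
  -- the initial dict: one empty list per rank
  have hInitItems : init.items = (PySem.List.pyRange 0 k).map (fun r => (r, ([] : List Int))) := by
    rw [hinit, PySem.Dict.items_foldl_insert_fresh (PySem.List.pyRange 0 k) (fun r => r)
      (fun _ => []) PySem.Dict.empty (by intro a _; rfl) (by simpa using nodup_pyRange 0 k)]
    simp [PySem.Dict.empty]
  have hInitEq : init = PySem.Dict.mk ((PySem.List.pyRange 0 k).map (fun r => (r, ([] : List Int)))) :=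
    PySem.Dict.ext hInitItems
  have hInitKeys : init.keys = PySem.List.pyRange 0 k := by
    rw [hInitEq]
    show List.map (fun p => p.1) (List.map (fun r => (r, ([] : List Int))) (PySem.List.pyRange 0 k))
      = PySem.List.pyRange 0 k
    rw [List.map_map]
    exact (List.map_congr_left fun a _ => rfl).trans (List.map_id _)
  -- replace the dict lookup by the rank count
  have hcongr : (PySem.List.enumerate rd).foldl
      (fun acc (p : Int × Int) =>
        acc.modify
          (((PySem.List.enumerate ds).foldl (fun d q => d.insert q.2 q.1)
            PySem.Dict.empty).getD p.2 0) [] (fun l => l ++ [p.1])) init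
      = (PySem.List.enumerate rd).foldl
        (fun acc (p : Int × Int) => acc.modify (cnt rd p.2) [] (fun l => l ++ [p.1])) init := by
    apply PySem.List.foldl_congr_mem
    intro acc p hp
    rw [hds, rfd_getD rd p.2 (enum_mem_snd hp)]
  rw [hcongr]
  -- every written key is an existing rank
  have hmemkeys : ∀ p ∈ PySem.List.enumerate rd, cnt rd p.2 ∈ PySem.List.pyRange 0 k := by
    intro p hp
    rw [PySem.List.mem_pyRange_one]
    have hm : p.2 ∈ ds := hds ▸ mem_dsOf (enum_mem_snd hp)
    have := cnt_lt_len (rd := rd) (d := p.2) (hds ▸ hm)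
    unfold cnt
    constructor
    · positivity
    · rw [hk, hds]; exact_mod_cast this
  have hKeys : ((PySem.List.enumerate rd).foldl
      (fun acc (p : Int × Int) => acc.modify (cnt rd p.2) [] (fun l => l ++ [p.1])) init).keys
      = PySem.List.pyRange 0 k := by
    rw [PySem.Dict.keys_foldl_modify_key (PySem.List.enumerate rd) (fun p => cnt rd p.2) []
      (fun _ p l => l ++ [p.1]) init, hInitKeys]
    apply set_update_self
    intro x hx
    rcases List.mem_map.mp hx with ⟨p, hp, rfl⟩
    exact hmemkeys p hp
  -- the final items, rank by rank
  have hItems := PySem.Dict.items_eq_map_keys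
    ((PySem.List.enumerate rd).foldl
      (fun acc (p : Int × Int) => acc.modify (cnt rd p.2) [] (fun l => l ++ [p.1])) init)
    (by rw [hKeys]; exact nodup_pyRange 0 k) []
  rw [hItems, hKeys]
  -- the value stored at each rank
  have hGetD : ∀ r : Int,
      ((PySem.List.enumerate rd).foldl
        (fun acc (p : Int × Int) => acc.modify (cnt rd p.2) [] (fun l => l ++ [p.1])) init).getD r []
      = ((PySem.List.enumerate rd).filter (fun q => cnt rd q.2 == r)).map (fun q => q.1) := by
    intro r
    have hfm : (PySem.List.enumerate rd).foldl
        (fun acc (p : Int × Int) => acc.modify (cnt rd p.2) [] (fun l => l ++ [p.1])) init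
        = ((PySem.List.enumerate rd).map (fun p => (cnt rd p.2, p.1))).foldl
          (fun acc (q : Int × Int) => acc.modify q.1 [] (fun l => l ++ [q.2])) init := by
      rw [List.foldl_map]
    rw [hfm, PySem.Dict.getD_foldl_modify_append]
    have hInitNil : init.getD r [] = [] := by
      rw [hInitEq]; exact lookup_map_nil _ r
    rw [hInitNil, List.nil_append, List.filter_map, List.map_map]
    rfl
  -- B's dict: one filtered list per device
  have hB : ((PySem.List.enumerate ds).foldl
      (fun d (p : Int × Int) => d.insert p.1
        (((PySem.List.enumerate rd).filter (fun q => q.2 == p.2)).map (fun q => q.1)))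
      PySem.Dict.empty).items
      = (PySem.List.enumerate ds).map (fun p => (p.1,
          ((PySem.List.enumerate rd).filter (fun q => q.2 == p.2)).map (fun q => q.1))) := by
    rw [PySem.Dict.items_foldl_insert_fresh (PySem.List.enumerate ds) (fun p => p.1) _
      PySem.Dict.empty (by intro a _; rfl)
      (by rw [enum_map_fst]; exact nodup_pyRange _ _)]
    simp [PySem.Dict.empty]
  rw [hB]
  -- bridge: the range of ranks is the first components of the enumerated device list
  have hRange : PySem.List.pyRange 0 k = (PySem.List.enumerate ds).map (fun p => p.1) := by
    rw [enum_map_fst, hk]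
    norm_num
  rw [hRange, List.map_map]
  apply List.map_congr_left
  intro p hp
  simp only [Function.comp]
  rw [hGetD p.1]
  refine congrArg _ (congrArg _ (List.filter_congr ?_))
  intro q hq
  have hqd : q.2 ∈ ds := hds ▸ mem_dsOf (enum_mem_snd hq)
  have hiff := enum_rank_iff ds 0 (hds ▸ pairwise_dsOf rd) q.2 hqd p hp
  rw [Bool.eq_iff_iff]
  simp only [beq_iff_eq]
  unfold cnt
  rw [← hds]
  constructor
  · intro hx
    exact hiff.mp (by omega)
  · intro hx
    have := hiff.mpr hx
    omega

theorem pair_fold_split (rfd : PySem.Dict Int Int) (ers : List (Int × Int))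
    (init : PySem.Dict Int (List Int)) :
    ers.foldl
      (fun (st : PySem.Dict Int Int × PySem.Dict Int (List Int)) p =>
        (st.1.insert p.1 (rfd.getD p.2 0),
         st.2.modify (rfd.getD p.2 0) [] (fun l => l ++ [p.1])))
      (PySem.Dict.empty, init)
      = (ers.foldl (fun d p => d.insert p.1 (rfd.getD p.2 0)) PySem.Dict.empty,
         ers.foldl (fun d p => d.modify (rfd.getD p.2 0) [] (fun l => l ++ [p.1])) init) :=
  PySem.List.foldl_prod_mk (fun d p => d.insert p.1 (rfd.getD p.2 0))
    (fun d p => d.modify (rfd.getD p.2 0) [] (fun l => l ++ [p.1])) ers PySem.Dict.empty init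

-- ===== VERDICT (by name: the statement is the Claim_ definition above) =====
theorem assign_replica_groups_spec : Claim_equal_assign_replica_groups := by
  intro rd _
  unfold Spec_assign_replica_groups assign_replica_groups assign_replica_groups_alt
  simp only
  rw [pair_fold_split]
  refine Prod.ext rfl (Prod.ext ?_ ?_)
  · exact r2r_items_eq rd
  · exact rk2r_items_eq rd
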